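-- pv_equiv track=rewrite | github.com/v4d1/Wordlister | wordlister.py | addNumEnd
-- ===== SOURCE A (Python) =====
-- def addNumEnd(dicc): #GENERA NUMS 0-999 0-9 00-99 000-999
-- 	dicc2 = []
-- 	for palabras in dicc:
-- 		diccaux = []
--
-- 		for i in range (0,10):
-- 			diccaux.append(palabras + str(i))
-- 			for j in range (0,10):
-- 				diccaux.append(palabras + str(i) + str(j))
-- 				for k in range (0,10):
-- 					diccaux.append(palabras + str(i) + str(j) + str(k))
-- 		dicc2 = dicc2 + diccaux
-- 	return dicc2
-- ===== SOURCE B (Python) =====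
-- def addNumEnd(dicc):
--     digits = [str(d) for d in range(10)]
--     table = (digits
--              + [a + b for a in digits for b in digits]
--              + [a + b + c for a in digits for b in digits for c in digits])
--     suffixes = sorted(table)
--     return [w + s for w in dicc for s in suffixes]
-- ===== Notes on version B (the rewrite author's own statement) =====
-- stated objective: simpler
-- what changed: A builds each word's 1110 suffixes with interleaved triple-nested digit loops (trie preorder) and recopies the accumulated output list for every word (dicc2 = dicc2 + diccaux); B builds the flat table of all 1-, 2- and 3-digit strings, sorts it once (lexicographic sort equals that preorder), and emits the whole result as one flat comprehension.
import Mathlib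
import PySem

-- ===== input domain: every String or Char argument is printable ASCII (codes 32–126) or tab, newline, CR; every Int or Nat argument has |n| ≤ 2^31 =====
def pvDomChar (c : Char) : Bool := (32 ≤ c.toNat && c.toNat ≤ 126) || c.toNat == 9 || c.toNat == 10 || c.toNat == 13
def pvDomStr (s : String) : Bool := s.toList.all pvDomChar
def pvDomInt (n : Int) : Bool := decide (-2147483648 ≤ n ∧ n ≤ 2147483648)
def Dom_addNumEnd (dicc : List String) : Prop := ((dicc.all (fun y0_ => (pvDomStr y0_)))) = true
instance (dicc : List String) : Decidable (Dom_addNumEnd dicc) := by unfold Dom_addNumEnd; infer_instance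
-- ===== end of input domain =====

-- B replaces A's interleaved triple-nested loops by building the flat suffix table (all 1-, 2-
-- and 3-digit strings), sorting it once, and emitting one flat comprehension (objective: simpler).

-- ===== PORT A =====
def addNumEnd (dicc : List String) : List String :=
  dicc.foldl (fun dicc2 palabras =>
    let diccaux : List String :=
      (PySem.List.pyRange 0 10 1).foldl (fun diccaux i =>
        (PySem.List.pyRange 0 10 1).foldl (fun diccaux j =>
          (PySem.List.pyRange 0 10 1).foldl (fun diccaux k =>
            diccaux ++ [palabras ++ PySem.Int.toStr i ++ PySem.Int.toStr j ++ PySem.Int.toStr k])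
            (diccaux ++ [palabras ++ PySem.Int.toStr i ++ PySem.Int.toStr j]))
          (diccaux ++ [palabras ++ PySem.Int.toStr i]))
        []
    dicc2 ++ diccaux) []

-- ===== PORT B =====
def pyDigits : List String := (PySem.List.pyRange 0 10 1).map (fun d => PySem.Int.toStr d)

def pyTable : List String :=
  pyDigits
  ++ pyDigits.flatMap (fun a => pyDigits.map (fun b => a ++ b))
  ++ pyDigits.flatMap (fun a => pyDigits.flatMap (fun b => pyDigits.map (fun c => a ++ b ++ c)))

def pySuffixes : List String := PySem.List.sorted pyTable (fun s => s) false

def addNumEnd_alt (dicc : List String) : List String :=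
  dicc.flatMap (fun w => pySuffixes.map (fun s => w ++ s))

-- ===== PRECONDITION & SPEC =====
def Spec_addNumEnd (dicc : List String) (out : List String) : Prop := out = addNumEnd_alt dicc
instance (dicc : List String) (out : List String) : Decidable (Spec_addNumEnd dicc out) := by unfold Spec_addNumEnd; infer_instance

-- ===== CLAIM (what is proved, stated in full; the proofs are below) =====
def Claim_equal_addNumEnd : Prop := ∀ (dicc : List String), Dom_addNumEnd dicc → Spec_addNumEnd dicc (addNumEnd dicc)

-- ===== LEMMAS AND PROOFS =====

-- the depth-n digit trie below prefix p, listed in A's preorder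
def goT : Nat → String → List String
  | 0, _ => []
  | n+1, p => pyDigits.flatMap (fun d => (p ++ d) :: goT n (p ++ d))

theorem digits_lit : pyDigits = ["0","1","2","3","4","5","6","7","8","9"] := by decide

theorem str_nil_append (a : String) : "" ++ a = a := rfl

-- boolean adjacent-comparison check, kernel-decidable (String `<` itself is not)
def chainLt : List String → Bool
  | a :: b :: t => decide (a.toList < b.toList) && chainLt (b :: t)
  | _ => true

theorem chainLt_isChain : ∀ {l : List String}, chainLt l = true → List.IsChain (· < ·) l
  | [], _ => .nil
  | [a], _ => List.IsChain.singleton a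
  | a :: b :: t, h => by
      simp [chainLt] at h
      exact .cons_cons (String.lt_iff_toList_lt.mpr h.1) (chainLt_isChain h.2)

theorem digits_pairwise : pyDigits.Pairwise (· < ·) :=
  List.isChain_iff_pairwise.mp (chainLt_isChain (l := pyDigits) (by decide))

theorem digits_single : ∀ d ∈ pyDigits, ∃ c, d.toList = [c] := by
  rw [digits_lit]; intro d hd
  fin_cases hd <;> exact ⟨_, rfl⟩

theorem lex_append_right (xs : List Char) (l : List Char) (h : l ≠ []) : xs < xs ++ l := by
  induction xs with
  | nil =>
      cases l with
      | nil => exact absurd rfl h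
      | cons c t => exact List.Lex.nil
  | cons a t ih => exact List.Lex.cons ih

theorem lex_middle (xs : List Char) {c c' : Char} (s s' : List Char) (h : c < c') :
    xs ++ c :: s < xs ++ c' :: s' := by
  induction xs with
  | nil => exact List.Lex.rel h
  | cons a t ih => exact List.Lex.cons ih

theorem singleton_lex {c c' : Char} (h : ([c] : List Char) < [c']) : c < c' := by
  cases h with
  | rel h => exact h
  | cons h => cases h

-- every element of goT n p extends p by a digit character and then more characters
theorem mem_goT : ∀ (n : Nat) (p : String) (x : String), x ∈ goT n p →
    ∃ c t, x.toList = p.toList ++ c :: t := by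
  intro n
  induction n with
  | zero => intro p x hx; simp [goT] at hx
  | succ n ih =>
      intro p x hx
      simp only [goT, List.mem_flatMap] at hx
      obtain ⟨d, hd, hx⟩ := hx
      obtain ⟨c, hc⟩ := digits_single d hd
      rcases List.mem_cons.mp hx with h | h
      · exact ⟨c, [], by simp [h, String.toList_append, hc]⟩
      · obtain ⟨c', t', ht'⟩ := ih (p ++ d) x h
        exact ⟨c, c' :: t', by
          rw [ht', String.toList_append, hc]
          simp⟩

-- every element of the d-block of goT (n+1) p starts with p.toList ++ [first char of d]
theorem block_form {n : Nat} {p d x : String} {c : Char} (hc : d.toList = [c])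
    (hx : x ∈ (p ++ d) :: goT n (p ++ d)) : ∃ s, x.toList = p.toList ++ c :: s := by
  rcases List.mem_cons.mp hx with h | h
  · exact ⟨[], by simp [h, String.toList_append, hc]⟩
  · obtain ⟨c', t', ht'⟩ := mem_goT n (p ++ d) x h
    exact ⟨c' :: t', by rw [ht', String.toList_append, hc]; simp⟩

theorem pairwise_flatMap {α β : Type} {S : α → α → Prop} {R : β → β → Prop}
    {l : List α} {f : α → List β}
    (hl : l.Pairwise S) (hf : ∀ a ∈ l, (f a).Pairwise R)
    (hx : ∀ a ∈ l, ∀ b ∈ l, S a b → ∀ x ∈ f a, ∀ y ∈ f b, R x y) :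
    (l.flatMap f).Pairwise R := by
  induction l with
  | nil => simp
  | cons a t ih =>
      rw [List.flatMap_cons, List.pairwise_append]
      rcases List.pairwise_cons.mp hl with ⟨hat, ht⟩
      refine ⟨hf a (by simp), ?_, ?_⟩
      · exact ih ht (fun b hb => hf b (by simp [hb]))
          (fun b hb b' hb' hS x hxb y hyb =>
            hx b (by simp [hb]) b' (by simp [hb']) hS x hxb y hyb)
      · intro x hxa y hy
        rcases List.mem_flatMap.mp hy with ⟨b, hb, hyb⟩
        exact hx a (by simp) b (by simp [hb]) (hat b hb) x hxa y hyb

theorem pairwise_goT : ∀ (n : Nat) (p : String), (goT n p).Pairwise (· < ·) := by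
  intro n
  induction n with
  | zero => intro p; simp [goT]
  | succ n ih =>
      intro p
      show (pyDigits.flatMap (fun d => (p ++ d) :: goT n (p ++ d))).Pairwise (· < ·)
      refine pairwise_flatMap digits_pairwise ?_ ?_
      · intro d hd
        refine List.pairwise_cons.mpr ⟨?_, ih (p ++ d)⟩
        intro x hx
        obtain ⟨c, t, hxl⟩ := mem_goT n (p ++ d) x hx
        rw [String.lt_iff_toList_lt, hxl]
        exact lex_append_right _ _ (by simp)
      · intro d hd d' hd' hdd' x hxm y hym
        obtain ⟨c, hc⟩ := digits_single d hd
        obtain ⟨c', hc'⟩ := digits_single d' hd'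
        have hcc' : c < c' := by
          have := String.lt_iff_toList_lt.mp hdd'
          rw [hc, hc'] at this
          exact singleton_lex this
        obtain ⟨s, hs⟩ := block_form hc hxm
        obtain ⟨s', hs'⟩ := block_form hc' hym
        rw [String.lt_iff_toList_lt, hs, hs']
        exact lex_middle _ _ _ hcc'

theorem goT_map : ∀ (n : Nat) (p w : String), goT n (w ++ p) = (goT n p).map (fun s => w ++ s) := by
  intro n
  induction n with
  | zero => intro p w; simp [goT]
  | succ n ih =>
      intro p w
      show pyDigits.flatMap (fun d => ((w ++ p) ++ d) :: goT n ((w ++ p) ++ d))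
          = (pyDigits.flatMap (fun d => (p ++ d) :: goT n (p ++ d))).map (fun s => w ++ s)
      rw [List.map_flatMap]
      refine List.flatMap_congr ?_
      intro d _
      simp only [List.map_cons, String.append_assoc, ih (p ++ d) w]

theorem perm_goT_succ (n : Nat) (p : String) :
    (goT (n+1) p).Perm
      (pyDigits.map (fun d => p ++ d) ++ pyDigits.flatMap (fun d => goT n (p ++ d))) := by
  have hs : pyDigits.flatMap (fun d => [p ++ d]) = pyDigits.map (fun d => p ++ d) :=
    (List.map_eq_flatMap (f := fun d => p ++ d) (l := pyDigits)).symm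
  have h := (List.flatMap_append_perm pyDigits (fun d => [p ++ d]) (fun d => goT n (p ++ d))).symm
  rw [hs] at h
  simpa [goT] using h

theorem goT_one (p : String) : goT 1 p = pyDigits.map (fun d => p ++ d) :=
  (List.map_eq_flatMap (f := fun d => p ++ d) (l := pyDigits)).symm

theorem perm_goT3 : (goT 3 "").Perm pyTable := by
  have hmap : pyDigits.map (fun d => "" ++ d) = pyDigits := by
    simp
  have h2 : (pyDigits.flatMap (fun d => goT 2 ("" ++ d))).Perm
      (pyDigits.flatMap (fun d => pyDigits.map (fun e => d ++ e))
       ++ pyDigits.flatMap (fun d => pyDigits.flatMap (fun e => pyDigits.map (fun c => d ++ e ++ c)))) := by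
    have hstep : (pyDigits.flatMap (fun d => goT 2 ("" ++ d))).Perm
        (pyDigits.flatMap (fun d =>
          pyDigits.map (fun e => d ++ e) ++ pyDigits.flatMap (fun e => pyDigits.map (fun c => d ++ e ++ c)))) := by
      refine List.Perm.flatMap_left pyDigits ?_
      intro d _
      have h := perm_goT_succ 1 d
      have hrw : pyDigits.flatMap (fun e => goT 1 (d ++ e))
          = pyDigits.flatMap (fun e => pyDigits.map (fun c => d ++ e ++ c)) := by
        refine List.flatMap_congr ?_
        intro e _
        exact goT_one (d ++ e)
      rw [hrw] at h
      simpa [str_nil_append] using h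
    exact hstep.trans (List.flatMap_append_perm pyDigits _ _).symm
  have h3 : (goT 3 "").Perm (pyDigits ++ pyDigits.flatMap (fun d => goT 2 ("" ++ d))) := by
    have h := perm_goT_succ 2 ""
    rwa [hmap] at h
  have : pyTable = pyDigits ++ (pyDigits.flatMap (fun d => pyDigits.map (fun e => d ++ e))
       ++ pyDigits.flatMap (fun d => pyDigits.flatMap (fun e => pyDigits.map (fun c => d ++ e ++ c)))) := by
    rw [pyTable, List.append_assoc]
  rw [this]
  exact h3.trans (List.Perm.append_left pyDigits h2)

theorem sorted_suffixes : pySuffixes = goT 3 "" :=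
  PySem.List.sorted_eq_of_perm_of_pairwise_lt pyTable (goT 3 "") (fun s => s) perm_goT3 (pairwise_goT 3 "")

theorem addNumEnd_word (w : String) :
    (PySem.List.pyRange 0 10 1).foldl (fun diccaux i =>
        (PySem.List.pyRange 0 10 1).foldl (fun diccaux j =>
          (PySem.List.pyRange 0 10 1).foldl (fun diccaux k =>
            diccaux ++ [w ++ PySem.Int.toStr i ++ PySem.Int.toStr j ++ PySem.Int.toStr k])
            (diccaux ++ [w ++ PySem.Int.toStr i ++ PySem.Int.toStr j]))
          (diccaux ++ [w ++ PySem.Int.toStr i]))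
        [] = goT 3 w := by
  simp only [PySem.List.foldl_append_eq_flatMap, List.append_assoc, List.nil_append,
    List.singleton_append, goT, pyDigits, List.flatMap_map]

-- ===== VERDICT (by name: the statement is the Claim_ definition above) =====
theorem addNumEnd_spec : Claim_equal_addNumEnd := by
  intro dicc _
  show addNumEnd dicc = addNumEnd_alt dicc
  simp only [addNumEnd, addNumEnd_alt]
  rw [PySem.List.foldl_append_eq_flatMap, List.nil_append]
  refine List.flatMap_congr ?_
  intro w _
  rw [addNumEnd_word w, sorted_suffixes, ← goT_map 3 "" w, String.append_empty]
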